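-- pv_equiv track=rewrite | github.com/Pavan-gr07/leetcode_prob | July-preparation/stack/monotonicStack.py | monotonic_decreasing_stack
-- ===== SOURCE A (Python) =====
-- def monotonic_decreasing_stack(arr):
--     stack = []
--     result = [] # Or process elements as they are popped
--     for element in arr:
--         while stack and stack[-1] < element: # For decreasing, pop if top is smaller
--             stack.pop() # Process popped elements if needed
--         stack.append(element)
--         # You might add elements to 'result' here based on problem needs
--     return stack # Or return 'result' depending on the problem
-- ===== SOURCE B (Python) =====
-- def monotonic_decreasing_stack(arr):
--     # Right-to-left scan keeping the running maximum: an element survives A's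
--     # stack iff it is >= every element to its right.
--     out = []
--     mx = None
--     for x in reversed(arr):
--         if mx is None or x >= mx:
--             out.append(x)
--             mx = x
--     out.reverse()
--     return out
-- ===== Notes on version B (the rewrite author's own statement) =====
-- stated objective: simpler
-- what changed: Replaces the stack with pop-loop by a single right-to-left scan keeping a running maximum (an element survives iff it is >= everything to its right), collected and reversed.
import Mathlib
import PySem

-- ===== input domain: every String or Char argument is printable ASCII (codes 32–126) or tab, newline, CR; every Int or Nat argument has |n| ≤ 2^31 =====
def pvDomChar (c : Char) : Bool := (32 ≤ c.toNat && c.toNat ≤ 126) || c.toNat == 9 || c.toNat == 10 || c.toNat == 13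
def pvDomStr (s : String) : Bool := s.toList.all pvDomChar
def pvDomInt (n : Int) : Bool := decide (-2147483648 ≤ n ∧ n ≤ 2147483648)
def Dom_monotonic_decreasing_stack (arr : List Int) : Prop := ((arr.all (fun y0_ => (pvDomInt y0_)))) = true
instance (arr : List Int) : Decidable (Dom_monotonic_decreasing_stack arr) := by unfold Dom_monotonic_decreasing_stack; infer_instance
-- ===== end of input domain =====

-- B changes the algorithm: a single right-to-left scan with a running maximum instead of a stack with a pop-loop; same output, objective: simpler.

-- ===== PORT A =====
-- A's stack is kept reversed (head = Python's stack[-1], the top); the result reverses it back.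
-- the 'while stack and stack[-1] < element: stack.pop()' loop
def pvPopLoop (rstack : List Int) (element : Int) : List Int :=
  match rstack with
  | [] => []
  | t :: rest => if t < element then pvPopLoop rest element else t :: rest

def monotonic_decreasing_stack (arr : List Int) : List Int :=
  (arr.foldl (fun rstack element => element :: pvPopLoop rstack element) []).reverse

-- ===== PORT B =====
-- processes arr from the right (Python's 'for x in reversed(arr)'), carrying (collected-so-far, running max)
def pvAltGo (arr : List Int) : List Int × Option Int :=
  match arr with
  | [] => ([], none)
  | x :: rest =>
    let (out, mx) := pvAltGo rest
    match mx with
    | none => (x :: out, some x)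
    | some m => if x ≥ m then (x :: out, some x) else (out, some m)

def monotonic_decreasing_stack_alt (arr : List Int) : List Int :=
  (pvAltGo arr).1

-- ===== PRECONDITION & SPEC =====
def Spec_monotonic_decreasing_stack (arr : List Int) (out : List Int) : Prop := out = monotonic_decreasing_stack_alt arr
instance (arr : List Int) (out : List Int) : Decidable (Spec_monotonic_decreasing_stack arr out) := by unfold Spec_monotonic_decreasing_stack; infer_instance

-- ===== CLAIM (what is proved, stated in full; the proofs are below) =====
def Claim_equal_monotonic_decreasing_stack : Prop := ∀ (arr : List Int), Dom_monotonic_decreasing_stack arr → Spec_monotonic_decreasing_stack arr (monotonic_decreasing_stack arr)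

-- ===== LEMMAS AND PROOFS =====

-- the elements of rstack that survive against running maximum mx
def pvKeep (rstack : List Int) (mx : Option Int) : List Int :=
  match mx with
  | none => rstack
  | some m => rstack.filter (fun t => decide (m ≤ t))

-- on a non-decreasing rstack the pop-loop is a filter
theorem pvPopLoop_eq_filter (rstack : List Int) (e : Int)
    (h : rstack.Pairwise (· ≤ ·)) :
    pvPopLoop rstack e = rstack.filter (fun t => decide (e ≤ t)) := by
  induction rstack with
  | nil => rfl
  | cons t rest ih =>
    simp only [List.pairwise_cons] at h
    by_cases ht : t < e
    · simp [pvPopLoop, ht, List.filter, show ¬ e ≤ t by omega, ih h.2]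
    · have hle : e ≤ t := by omega
      have : rest.filter (fun t => decide (e ≤ t)) = rest := by
        apply List.filter_eq_self.mpr
        intro a ha
        have := h.1 a ha
        simp; omega
      simp [pvPopLoop, ht, List.filter, hle, this]

theorem pvFilter_pairwise (l : List Int) (p : Int → Bool)
    (h : l.Pairwise (· ≤ ·)) : (l.filter p).Pairwise (· ≤ ·) :=
  h.sublist List.filter_sublist

-- main invariant: running A's fold from any non-decreasing reversed stack
theorem pvMain (rest : List Int) : ∀ (rstack : List Int),
    rstack.Pairwise (· ≤ ·) →
    (rest.foldl (fun rstack element => element :: pvPopLoop rstack element) rstack).reverse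
      = (pvKeep rstack (pvAltGo rest).2).reverse ++ (pvAltGo rest).1 := by
  induction rest with
  | nil => intro rstack h; simp [pvAltGo, pvKeep]
  | cons e rest' ih =>
    intro rstack h
    have hpop := pvPopLoop_eq_filter rstack e h
    have hsorted : (e :: pvPopLoop rstack e).Pairwise (· ≤ ·) := by
      rw [hpop]
      refine List.pairwise_cons.mpr ⟨?_, pvFilter_pairwise _ _ h⟩
      intro a ha
      have := List.of_mem_filter ha
      simpa using this
    have ihe := ih (e :: pvPopLoop rstack e) hsorted
    simp only [List.foldl_cons, ihe]
    rcases hrest : rest' with _ | ⟨y, ys⟩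
    · -- rest' = []: no IH needed, the tail contributes nothing
      simp [pvAltGo, pvKeep, hpop]
    · -- rest' nonempty: its running maximum is some m
      obtain ⟨m, hmx⟩ : ∃ m, (pvAltGo (y :: ys)).2 = some m := by
        simp only [pvAltGo]
        rcases pvAltGo ys with ⟨o, _ | m0⟩
        · exact ⟨y, rfl⟩
        · by_cases hy : y ≥ m0
          · exact ⟨y, by simp [hy]⟩
          · exact ⟨m0, by simp [hy]⟩
      rw [← hrest] at hmx ⊢
      have hsplit : (pvAltGo rest') = ((pvAltGo rest').1, some m) := by rw [← hmx]
      by_cases hge : e ≥ m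
      · have hA : pvAltGo (e :: rest') = (e :: (pvAltGo rest').1, some e) := by
          simp only [pvAltGo]; rw [hsplit]; simp [hge]
        rw [hA, hmx]
        simp only [pvKeep, hpop, List.filter]
        have hme : decide (m ≤ e) = true := by simp; omega
        rw [hme]
        have hff : (rstack.filter (fun t => decide (e ≤ t))).filter (fun t => decide (m ≤ t))
            = rstack.filter (fun t => decide (e ≤ t)) := by
          apply List.filter_eq_self.mpr
          intro a ha
          have := List.of_mem_filter ha
          simp at this ⊢; omega
        simp [hff]
      · have hA : pvAltGo (e :: rest') = ((pvAltGo rest').1, some m) := by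
          simp only [pvAltGo]; rw [hsplit]; simp [hge]
        rw [hA, hmx]
        simp only [pvKeep, hpop, List.filter]
        have hme : decide (m ≤ e) = false := by simp; omega
        rw [hme]
        have hff : (rstack.filter (fun t => decide (e ≤ t))).filter (fun t => decide (m ≤ t))
            = rstack.filter (fun t => decide (m ≤ t)) := by
          rw [List.filter_filter]
          apply List.filter_congr
          intro a _
          simp; omega
        simp [hff]

-- ===== VERDICT (by name: the statement is the Claim_ definition above) =====
theorem monotonic_decreasing_stack_spec : Claim_equal_monotonic_decreasing_stack := by
  intro arr _
  unfold Spec_monotonic_decreasing_stack monotonic_decreasing_stack monotonic_decreasing_stack_alt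
  have h := pvMain arr [] (by simp)
  have hk : pvKeep [] (pvAltGo arr).2 = [] := by cases (pvAltGo arr).2 <;> rfl
  rw [hk] at h
  simpa using h
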